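-- pv_equiv track=rewrite | github.com/autophagy/scieldas | scieldas/services/pypi/api.py | _get_package_format
-- ===== SOURCE A (Python) =====
-- from typing import List, Optional
--
-- def _get_package_format(releaseArtifacts: List[dict]) -> str:
--     wheel = ["wheel", "bdist_wheel"]
--     egg = ["egg", "bdist_egg"]
--     has_wheel, has_egg = False, False
--     for artifact in releaseArtifacts:
--         has_wheel = artifact["packagetype"] in wheel or has_wheel
--         has_egg = artifact["packagetype"] in egg or has_egg
--     return "wheel" if has_wheel else "egg" if has_egg else "source"
-- ===== SOURCE B (Python) =====
-- def _get_package_format(releaseArtifacts):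
--     rank = {"wheel": 0, "bdist_wheel": 0, "egg": 1, "bdist_egg": 1}
--     ranks = [rank.get(a["packagetype"], 2) for a in releaseArtifacts]
--     return ("wheel", "egg", "source")[min(ranks, default=2)]
-- ===== Notes on version B (the rewrite author's own statement) =====
-- stated objective: alternative
-- what changed: Maps every artifact to a numeric priority rank via a lookup table, reduces with min, and indexes the answer out of a result tuple, replacing A's pair of boolean flags and if-chain with a rank/min-reduction.
import Mathlib
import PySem

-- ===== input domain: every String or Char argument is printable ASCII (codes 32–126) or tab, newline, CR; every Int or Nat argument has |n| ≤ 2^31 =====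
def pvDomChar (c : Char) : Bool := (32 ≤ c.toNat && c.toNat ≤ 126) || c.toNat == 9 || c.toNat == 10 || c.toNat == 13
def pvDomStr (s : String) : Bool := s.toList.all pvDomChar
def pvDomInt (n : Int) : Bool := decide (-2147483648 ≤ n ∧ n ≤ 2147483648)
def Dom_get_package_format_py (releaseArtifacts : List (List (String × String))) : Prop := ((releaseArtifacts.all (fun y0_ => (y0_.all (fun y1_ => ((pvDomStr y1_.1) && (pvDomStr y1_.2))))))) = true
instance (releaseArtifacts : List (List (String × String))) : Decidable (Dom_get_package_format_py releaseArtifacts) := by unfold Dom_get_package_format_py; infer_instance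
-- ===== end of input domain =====

-- B maps each artifact to a numeric priority rank, reduces with min, and indexes the answer out of
-- a tuple, replacing A's pair of boolean flags and if-chain (objective: alternative).


-- ===== PORT A =====
-- artifact["packagetype"]: KeyError (excluded by Pre_) modelled by getD "" — exact under Pre_
def pvPkgType (a : List (String × String)) : String :=
  (PySem.Dict.mk a).getD "packagetype" ""

def get_package_format_py (releaseArtifacts : List (List (String × String))) : String :=
  let wheel := ["wheel", "bdist_wheel"]
  let egg := ["egg", "bdist_egg"]
  let st := releaseArtifacts.foldl
    (fun (p : Bool × Bool) artifact =>
      (decide (pvPkgType artifact ∈ wheel) || p.1,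
       decide (pvPkgType artifact ∈ egg) || p.2))
    (false, false)
  if st.1 then "wheel" else if st.2 then "egg" else "source"

-- ===== PORT B =====
def pvRank (a : List (String × String)) : Int :=
  (PySem.Dict.mk [("wheel", (0 : Int)), ("bdist_wheel", 0), ("egg", 1), ("bdist_egg", 1)]).getD
    (pvPkgType a) 2

def get_package_format_py_alt (releaseArtifacts : List (List (String × String))) : String :=
  let ranks := releaseArtifacts.map pvRank
  let m := (PySem.List.min? ranks (fun x => x)).getD 2
  (PySem.List.pyGet? ["wheel", "egg", "source"] m).getD ""

-- ===== PRECONDITION & SPEC =====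
-- Pre_ excludes artifacts missing the "packagetype" key: both A and B raise KeyError there.
def Pre_get_package_format_py (releaseArtifacts : List (List (String × String))) : Prop :=
  ∀ a ∈ releaseArtifacts, "packagetype" ∈ a.map Prod.fst
instance (releaseArtifacts : List (List (String × String))) : Decidable (Pre_get_package_format_py releaseArtifacts) := by unfold Pre_get_package_format_py; infer_instance
def pvWitness_get_package_format_py : (List (List (String × String))) := [[("packagetype", "bdist_wheel")], [("packagetype", "sdist")]]
def Spec_get_package_format_py (releaseArtifacts : List (List (String × String))) (out : String) : Prop := out = get_package_format_py_alt releaseArtifacts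
instance (releaseArtifacts : List (List (String × String))) (out : String) : Decidable (Spec_get_package_format_py releaseArtifacts out) := by unfold Spec_get_package_format_py; infer_instance

-- ===== CLAIM =====
def Claim_equal_get_package_format_py : Prop := ∀ (releaseArtifacts : List (List (String × String))), Dom_get_package_format_py releaseArtifacts → Pre_get_package_format_py releaseArtifacts → Spec_get_package_format_py releaseArtifacts (get_package_format_py releaseArtifacts)

-- ===== LEMMAS AND PROOFS =====
-- A's or-accumulating fold computes `any` of each component.
theorem pvFold_any (xs : List (List (String × String))) (f g : List (String × String) → Bool) (b1 b2 : Bool) :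
    xs.foldl (fun (p : Bool × Bool) a => (f a || p.1, g a || p.2)) (b1, b2)
      = (b1 || xs.any f, b2 || xs.any g) := by
  induction xs generalizing b1 b2 with
  | nil => simp
  | cons x xs ih =>
    simp [List.any_cons, ih]
    constructor <;> (cases f x <;> cases g x <;> simp [Bool.or_comm])

-- the rank table, pointwise
theorem pvRank_eq (a : List (String × String)) :
    pvRank a = if pvPkgType a = "wheel" ∨ pvPkgType a = "bdist_wheel" then 0
      else if pvPkgType a = "egg" ∨ pvPkgType a = "bdist_egg" then 1 else 2 := by
  simp only [pvRank, PySem.Dict.getD, PySem.Dict.get?_mk_cons, beq_iff_eq]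
  by_cases h1 : "wheel" = pvPkgType a
  · simp [← h1]
  by_cases h2 : "bdist_wheel" = pvPkgType a
  · simp [← h2]
  by_cases h3 : "egg" = pvPkgType a
  · simp [← h3]
  by_cases h4 : "bdist_egg" = pvPkgType a
  · simp [← h4]
  have g1 : ¬ pvPkgType a = "wheel" := fun h => h1 h.symm
  have g2 : ¬ pvPkgType a = "bdist_wheel" := fun h => h2 h.symm
  have g3 : ¬ pvPkgType a = "egg" := fun h => h3 h.symm
  have g4 : ¬ pvPkgType a = "bdist_egg" := fun h => h4 h.symm
  simp [h1, h2, h3, h4, g1, g2, g3, g4, PySem.Dict.get?]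

-- min over a list of ranks drawn from {0,1,2}
theorem pvMin_ranks (rs : List Int) (h : ∀ r ∈ rs, r = 0 ∨ r = 1 ∨ r = 2) :
    ((PySem.List.min? rs (fun x => x)).getD 2)
      = if 0 ∈ rs then 0 else if 1 ∈ rs then 1 else 2 := by
  induction rs with
  | nil => simp [PySem.List.min?]
  | cons r t ih =>
    have hr := h r (List.mem_cons_self ..)
    have ht := fun x hx => h x (List.mem_cons_of_mem _ hx)
    have := ih ht
    rcases hmin : PySem.List.min? (r :: t) (fun x => x) with _ | m
    · simp [PySem.List.min?_eq_none_iff] at hmin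
    · have hmem := PySem.List.min?_mem hmin
      have hle := PySem.List.min?_isMin hmin
      have hm := h m hmem
      simp only [Option.getD_some]
      rcases hm with hm | hm | hm <;> subst hm
      · simp [show (0:Int) ∈ r :: t from hmem]
      · have h0 : (0:Int) ∉ r :: t := by
          intro h0; have := hle 0 h0; omega
        simp [h0, show (1:Int) ∈ r :: t from hmem]
      · have h0 : (0:Int) ∉ r :: t := by intro h0; have := hle 0 h0; omega
        have h1 : (1:Int) ∉ r :: t := by intro h1; have := hle 1 h1; omega
        simp [h0, h1]

-- ===== VERDICT =====
theorem get_package_format_py_spec : Claim_equal_get_package_format_py := by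
  intro xs _ _
  unfold Spec_get_package_format_py get_package_format_py get_package_format_py_alt
  have hall : ∀ r ∈ xs.map pvRank, r = 0 ∨ r = 1 ∨ r = 2 := by
    intro r hr
    obtain ⟨a, _, rfl⟩ := List.mem_map.mp hr
    rw [pvRank_eq]; split_ifs <;> simp
  simp only [pvFold_any, Bool.false_or, pvMin_ranks _ hall]
  simp only [List.any_eq_true, List.mem_map, decide_eq_true_eq, List.mem_cons,
    List.not_mem_nil, or_false]
  by_cases hw : ∃ a ∈ xs, pvPkgType a = "wheel" ∨ pvPkgType a = "bdist_wheel" <;>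
    by_cases he : ∃ a ∈ xs, pvPkgType a = "egg" ∨ pvPkgType a = "bdist_egg"
  all_goals
    have h0 : (∃ a ∈ xs, pvRank a = 0) ↔ (∃ a ∈ xs, pvPkgType a = "wheel" ∨ pvPkgType a = "bdist_wheel") := by
      constructor <;> rintro ⟨a, ha, hv⟩ <;> refine ⟨a, ha, ?_⟩ <;>
        rw [pvRank_eq] at * <;> split_ifs at * <;> simp_all
    have h1 : (∃ a ∈ xs, pvRank a = 1) → (∃ a ∈ xs, pvPkgType a = "egg" ∨ pvPkgType a = "bdist_egg") := by
      rintro ⟨a, ha, hv⟩; refine ⟨a, ha, ?_⟩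
      rw [pvRank_eq] at hv; split_ifs at hv <;> simp_all
  · -- wheel present
    simp [h0.mpr hw, hw, PySem.List.pyGet?, PySem.List.pyIdx?]
  · simp [h0.mpr hw, hw, PySem.List.pyGet?, PySem.List.pyIdx?]
  · -- no wheel, egg present
    obtain ⟨a, ha, hv⟩ := id he
    have hr1 : pvRank a = 1 := by
      rw [pvRank_eq]
      rw [if_neg (by intro h; exact hw ⟨a, ha, h⟩), if_pos hv]
    have hne0 : ¬ ∃ a ∈ xs, pvRank a = 0 := fun h => hw (h0.mp h)
    simp [hne0, hw, he, show ∃ a ∈ xs, pvRank a = 1 from ⟨a, ha, hr1⟩, PySem.List.pyGet?, PySem.List.pyIdx?]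
  · -- neither
    have hne0 : ¬ ∃ a ∈ xs, pvRank a = 0 := fun h => hw (h0.mp h)
    have hne1 : ¬ ∃ a ∈ xs, pvRank a = 1 := fun h => he (h1 h)
    simp [hne0, hne1, hw, he, PySem.List.pyGet?, PySem.List.pyIdx?]
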